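-- pv_equiv track=rewrite | github.com/clatworthylab/bulkBCRseq | isotyper/Read_processing_and_quality.py | get_max_orf
-- ===== SOURCE A (Python) =====
-- def get_max_orf(ORF, word, dict):
--     """Summary
--
--     Parameters
--     ----------
--     ORF : TYPE
--         Description
--     word : TYPE
--         Description
--     dict : TYPE
--         Description
--
--     Returns
--     -------
--     TYPE
--         Description
--     """
--     score = []
--     codon = []
--     if len(ORF) > 1:
--         for si in ORF:
--             s = si[0]
--             sc = 0
--             for i in range(1, len(s) - word):
--                 if s[i : (i + word)] in dict:
--                     sc = sc + 1
--             score.append(sc)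
--             codon.append(si[1])
--         maxi = score.index(max(score))
--         orf = ORF[maxi][0]
--         mscore = max(score)
--         codon = ORF[maxi][1]
--     else:
--         for si in ORF:
--             orf = si[0]
--             mscore = 1000
--             codon = si[1]
--     return (orf, mscore, codon)
-- ===== SOURCE B (Python) =====
-- def get_max_orf(ORF, word, dict):
--     if len(ORF) == 1:
--         s, c = ORF[0]
--         return (s, 1000, c)
--     best_score, best_orf, best_codon = -1, None, None
--     for s, c in ORF:
--         sc = 0
--         for i in range(1, len(s) - word):
--             if s[i : (i + word)] in dict:
--                 sc = sc + 1
--         if sc > best_score: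
--             best_score, best_orf, best_codon = sc, s, c
--     return (best_orf, best_score, best_codon)
-- ===== Notes on version B (the rewrite author's own statement) =====
-- stated objective: simpler
-- what changed: Replaces A's build-a-score-list then max/index/max argmax (three extra passes plus an O(n) index scan) with a single pass keeping a running (best_score, best_orf, best_codon), updating only on strict improvement to preserve first-max tie-breaking; the inner substring-count loop is unchanged.
import Mathlib
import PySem

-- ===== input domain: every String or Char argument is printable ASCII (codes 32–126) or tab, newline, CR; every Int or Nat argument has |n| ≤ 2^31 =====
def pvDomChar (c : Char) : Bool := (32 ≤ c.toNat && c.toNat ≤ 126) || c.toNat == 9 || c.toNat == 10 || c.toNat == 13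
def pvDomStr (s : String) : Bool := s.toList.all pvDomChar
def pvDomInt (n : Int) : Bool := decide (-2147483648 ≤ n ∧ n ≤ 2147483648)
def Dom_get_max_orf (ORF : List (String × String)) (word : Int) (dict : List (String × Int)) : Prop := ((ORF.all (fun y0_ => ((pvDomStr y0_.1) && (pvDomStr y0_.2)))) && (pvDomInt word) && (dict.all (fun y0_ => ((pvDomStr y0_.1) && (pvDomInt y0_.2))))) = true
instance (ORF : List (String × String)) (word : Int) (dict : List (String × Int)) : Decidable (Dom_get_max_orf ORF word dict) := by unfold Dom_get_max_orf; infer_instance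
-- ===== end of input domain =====

-- B replaces A's build-score-list / max / index / re-max structure by one pass that keeps a
-- running (best_score, best_orf, best_codon) with strict-improvement updates (objective: simpler).


-- the inner counting loop, identical in A and in B (shared helper):
-- sc = 0; for i in range(1, len(s) - word): if s[i:i+word] in dict: sc += 1
def pvScore (s : String) (word : Int) (dict : List (String × Int)) : Int :=
  (PySem.List.pyRange 1 ((s.toList.length : Int) - word) 1).foldl
    (fun sc i =>
      if dict.any (fun kv => kv.1 == String.ofList (PySem.List.slice s.toList (some i) (some (i + word)))) then
        sc + 1
      else sc) 0

-- ===== PORT A =====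
def get_max_orf (ORF : List (String × String)) (word : Int) (dict : List (String × Int)) : String × Int × String :=
  if ORF.length > 1 then
    -- score = []; codon = []; for si in ORF: score.append(sc); codon.append(si[1])
    let sc := ORF.foldl
      (fun (acc : List Int × List String) si => (acc.1 ++ [pvScore si.1 word dict], acc.2 ++ [si.2]))
      ([], [])
    let score := sc.1
    let m := (PySem.List.max? score (fun x => x)).getD 0          -- max(score); score ≠ [] here
    let maxi := (PySem.List.index? score m).getD 0                 -- score.index(max(score))
    let p := PySem.List.pyGetD ORF (maxi : Int) ("", "")           -- ORF[maxi]; in range here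
    (p.1, m, p.2)
  else
    -- for si in ORF: orf = si[0]; mscore = 1000; codon = si[1]  (unbound when ORF == [])
    ORF.foldl (fun _ si => (si.1, (1000 : Int), si.2)) ("", 0, "")

-- ===== PORT B =====
def get_max_orf_alt (ORF : List (String × String)) (word : Int) (dict : List (String × Int)) : String × Int × String :=
  if ORF.length == 1 then
    match ORF with
    | si :: _ => (si.1, 1000, si.2)
    | [] => ("", 0, "")
  else
    let r := ORF.foldl
      (fun (b : Int × String × String) si =>
        let sc := pvScore si.1 word dict
        if b.1 < sc then (sc, si.1, si.2) else b)
      (-1, "", "")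
    (r.2.1, r.1, r.2.2)

-- ===== PRECONDITION & SPEC =====
-- Pre_ excludes exactly the empty ORF list, on which A raises UnboundLocalError.
def Pre_get_max_orf (ORF : List (String × String)) (word : Int) (dict : List (String × Int)) : Prop :=
  ORF ≠ []
instance (ORF : List (String × String)) (word : Int) (dict : List (String × Int)) : Decidable (Pre_get_max_orf ORF word dict) := by unfold Pre_get_max_orf; infer_instance
def pvWitness_get_max_orf : (List (String × String)) × Int × (List (String × Int)) :=
  ([("abcab", "X"), ("zzz", "Y")], 2, [("bc", 1), ("zz", 2)])
def Spec_get_max_orf (ORF : List (String × String)) (word : Int) (dict : List (String × Int)) (out : String × Int × String) : Prop := out = get_max_orf_alt ORF word dict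
instance (ORF : List (String × String)) (word : Int) (dict : List (String × Int)) (out : String × Int × String) : Decidable (Spec_get_max_orf ORF word dict out) := by unfold Spec_get_max_orf; infer_instance

-- ===== CLAIM (what is proved, stated in full; the proofs are below) =====
def Claim_equal_get_max_orf : Prop := ∀ (ORF : List (String × String)) (word : Int) (dict : List (String × Int)), Dom_get_max_orf ORF word dict → Pre_get_max_orf ORF word dict → Spec_get_max_orf ORF word dict (get_max_orf ORF word dict)

-- ===== LEMMAS AND PROOFS =====

-- reference "first maximum" of a nonempty list, with its element
def pvFM (g : (String × String) → Int) : List (String × String) → Int × String × String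
  | [] => (-1, "", "")
  | si :: rest =>
    match rest with
    | [] => (g si, si.1, si.2)
    | _ :: _ =>
      let r := pvFM g rest
      if r.1 ≤ g si then (g si, si.1, si.2) else r

theorem pvFM_cons_cons (g : (String × String) → Int) (si c : String × String)
    (t : List (String × String)) :
    pvFM g (si :: c :: t) =
      if (pvFM g (c :: t)).1 ≤ g si then (g si, si.1, si.2) else pvFM g (c :: t) := rfl

theorem pvScore_nonneg (s : String) (word : Int) (dict : List (String × Int)) :
    0 ≤ pvScore s word dict := by
  unfold pvScore
  rw [PySem.List.foldl_count_if]
  positivity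

theorem pvFM_mem (g : (String × String) → Int) (L : List (String × String)) (hL : L ≠ []) :
    ∃ si ∈ L, pvFM g L = (g si, si.1, si.2) := by
  induction L with
  | nil => exact absurd rfl hL
  | cons si rest ih =>
    cases rest with
    | nil => exact ⟨si, by simp, rfl⟩
    | cons c t =>
      obtain ⟨sj, hmem, heq⟩ := ih (by simp)
      rw [pvFM_cons_cons]
      by_cases h : (pvFM g (c :: t)).1 ≤ g si
      · exact ⟨si, by simp, by rw [if_pos h]⟩
      · exact ⟨sj, List.mem_cons_of_mem _ hmem, by rw [if_neg h, heq]⟩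

-- B's one-pass fold against the reference
theorem pvFold_eq (g : (String × String) → Int) (L : List (String × String))
    (hL : L ≠ []) (b : Int × String × String) :
    L.foldl (fun b si => if b.1 < g si then (g si, si.1, si.2) else b) b
      = if b.1 < (pvFM g L).1 then pvFM g L else b := by
  induction L generalizing b with
  | nil => exact absurd rfl hL
  | cons si rest ih =>
    cases rest with
    | nil => simp [pvFM, List.foldl]
    | cons c t =>
      rw [List.foldl_cons, ih (by simp) _, pvFM_cons_cons]
      split_ifs <;> first | rfl | (exfalso; (try simp only at *); omega)

-- the accumulator step of PySem.List.max? at key = identity over Int (A's max(score))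
def pvMaxStep (acc : Option Int) (x : Int) : Option Int :=
  match acc with | none => some x | some m => if m < x then some x else some m

theorem pvMax_eq_foldl (xs : List Int) :
    PySem.List.max? xs (fun y : Int => y) = xs.foldl pvMaxStep none := by
  unfold PySem.List.max?
  congr 1
  funext acc x
  cases acc <;> rfl

theorem pvMaxAcc (xs : List Int) (a : Int) :
    xs.foldl pvMaxStep (some a)
      = some (match xs.foldl pvMaxStep none with
          | none => a
          | some m => if a < m then m else a) := by
  induction xs generalizing a with
  | nil => rfl
  | cons x t ih =>
    have hstep : ∀ z : Int, pvMaxStep (some z) x = some (if z < x then x else z) := by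
      intro z
      show (if z < x then some x else some z) = some (if z < x then x else z)
      split_ifs <;> rfl
    rw [List.foldl_cons, List.foldl_cons, hstep,
      show pvMaxStep none x = some x from rfl, ih, ih x]
    cases t.foldl pvMaxStep none with
    | none => rfl
    | some m =>
      simp only [Option.some.injEq]
      split_ifs <;> omega

-- A's argmax computation (max, index of max, element at that index) against the reference
theorem pvAChar (g : (String × String) → Int) (L : List (String × String)) (hL : L ≠ []) :
    PySem.List.max? (L.map g) (fun y : Int => y) = some (pvFM g L).1 ∧
    ∃ j : Nat, PySem.List.index? (L.map g) (pvFM g L).1 = some j ∧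
      L.getD j ("", "") = ((pvFM g L).2.1, (pvFM g L).2.2) := by
  induction L with
  | nil => exact absurd rfl hL
  | cons si rest ih =>
    cases rest with
    | nil =>
      refine ⟨by rw [pvMax_eq_foldl]; rfl, 0, ?_, rfl⟩
      show PySem.List.index? [g si] (g si) = some 0
      exact PySem.List.index?_cons_self _ _
    | cons c t =>
      obtain ⟨hmax, j, hidx, hget⟩ := ih (by simp)
      rw [pvMax_eq_foldl] at hmax
      rw [pvFM_cons_cons]
      constructor
      · show PySem.List.max? (g si :: (c :: t).map g) _ = _
        rw [pvMax_eq_foldl, List.foldl_cons,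
          show pvMaxStep none (g si) = some (g si) from rfl, pvMaxAcc, hmax]
        show some (if g si < (pvFM g (c :: t)).1 then (pvFM g (c :: t)).1 else g si) = _
        by_cases h : (pvFM g (c :: t)).1 ≤ g si
        · rw [if_pos h, if_neg (by omega)]
        · rw [if_neg h, if_pos (by omega)]
      · by_cases h : (pvFM g (c :: t)).1 ≤ g si
        · refine ⟨0, ?_, by rw [if_pos h]; rfl⟩
          rw [if_pos h]
          show PySem.List.index? (g si :: (c :: t).map g) (g si) = some 0
          exact PySem.List.index?_cons_self _ _
        · refine ⟨j + 1, ?_, ?_⟩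
          · rw [if_neg h]
            show PySem.List.index? (g si :: (c :: t).map g) _ = _
            rw [PySem.List.index?_cons_of_ne _ (fun he => h (le_of_eq he.symm)), hidx]
            rfl
          · rw [if_neg h]
            exact hget

-- ===== VERDICT (by name: the statement is the Claim_ definition above) =====
theorem get_max_orf_spec : Claim_equal_get_max_orf := by
  intro ORF word dict _ hpre
  unfold Spec_get_max_orf get_max_orf get_max_orf_alt
  match ORF, hpre with
  | [si], _ => simp
  | si :: c :: t, _ =>
    set L := si :: c :: t with hLdef
    have hL : L ≠ [] := by simp [hLdef]
    set g : (String × String) → Int := fun p => pvScore p.1 word dict with hg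
    have hlen : L.length > 1 := by simp [hLdef]
    rw [if_pos hlen, if_neg (by simp [hLdef])]
    -- A side: the pair fold splits; the score list is L.map g
    rw [PySem.List.foldl_prod_mk (fun a si => a ++ [g si]) (fun b (si : String × String) => b ++ [si.2]) L [] []]
    simp only [PySem.List.foldl_append_singleton_eq_map, List.nil_append]
    obtain ⟨hmax, j, hidx, hget⟩ := pvAChar g L hL
    rw [hmax]
    simp only [Option.getD_some]
    rw [hidx]
    simp only [Option.getD_some, PySem.List.pyGetD_natCast, hget]
    -- B side: the single pass computes the same first maximum
    rw [pvFold_eq g L hL]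
    obtain ⟨sj, _, hfm⟩ := pvFM_mem g L hL
    have hpos : (-1 : Int) < (pvFM g L).1 := by
      rw [hfm]
      show (-1 : Int) < pvScore sj.1 word dict
      have := pvScore_nonneg sj.1 word dict
      omega
    rw [if_pos hpos]
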